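-- pv_equiv track=rewrite | github.com/pytorch/helion | helion/autotuner/heuristic_generator.py | _extract_non_batch_key
-- ===== SOURCE A (Python) =====
-- from typing import Any
--
-- def _extract_non_batch_key(
--     features: dict[str, Any],
--     batched_spec: list[list[int | None] | None] | None,
-- ) -> str:
--     """
--     Extract a key string from non-batch features only.
--
--     Args:
--         features: Shape features dict (e.g., {"arg0_dim0": 32, "arg0_dim1": 1024, ...})
--         batched_spec: Batched dimension spec (e.g., [[0, None], None])
--             Format: list per arg, each is list of dims where int = batched, None = not batched
--
--     Returns:
--         String key built from non-batch features only.
--     """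
--     if batched_spec is None:
--         # No batch info - treat all features as non-batch
--         return "|".join(f"{k}={v}" for k, v in sorted(features.items()))
--
--     # Build set of batch dimension feature names
--     batch_feature_names: set[str] = set()
--     for arg_idx, arg_dims in enumerate(batched_spec):
--         if arg_dims is None:
--             continue  # Non-tensor arg
--         for dim_idx, batch_flag in enumerate(arg_dims):
--             if batch_flag is not None:  # This dim is batched
--                 batch_feature_names.add(f"arg{arg_idx}_dim{dim_idx}")
--
--     # Build key from non-batch features
--     non_batch_parts: list[str] = []
--     for key, value in sorted(features.items()):
--         if key not in batch_feature_names: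
--             non_batch_parts.append(f"{key}={value}")
--
--     return "|".join(non_batch_parts)
-- ===== SOURCE B (Python) =====
-- def _extract_non_batch_key(features, batched_spec):
--     # Sort-then-merge set difference: generate the batched feature names, sort
--     # them, and walk the sorted features and sorted names in lockstep with one
--     # pointer (no membership set, no hash lookup; 'or []' collapses the
--     # batched_spec-is-None case into the same merge with an empty name list).
--     names = sorted(
--         f"arg{i}_dim{j}"
--         for i, dims in enumerate(batched_spec or [])
--         for j, flag in enumerate(dims or [])
--         if flag is not None
--     )
--     out = []
--     t = 0
--     for k, v in sorted(features.items()):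
--         while t < len(names) and names[t] < k:
--             t += 1
--         if t == len(names) or names[t] != k:
--             out.append(f"{k}={v}")
--     return "|".join(out)
-- ===== Notes on version B (the rewrite author's own statement) =====
-- stated objective: alternative
-- what changed: Instead of precomputing a hash set of batched feature names and testing each sorted feature for membership, B sorts the generated batched names and filters the sorted features by a single-pointer lockstep merge (sorted set difference), with 'or []' collapsing the batched_spec-is-None branch into the same merge.
import Mathlib
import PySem

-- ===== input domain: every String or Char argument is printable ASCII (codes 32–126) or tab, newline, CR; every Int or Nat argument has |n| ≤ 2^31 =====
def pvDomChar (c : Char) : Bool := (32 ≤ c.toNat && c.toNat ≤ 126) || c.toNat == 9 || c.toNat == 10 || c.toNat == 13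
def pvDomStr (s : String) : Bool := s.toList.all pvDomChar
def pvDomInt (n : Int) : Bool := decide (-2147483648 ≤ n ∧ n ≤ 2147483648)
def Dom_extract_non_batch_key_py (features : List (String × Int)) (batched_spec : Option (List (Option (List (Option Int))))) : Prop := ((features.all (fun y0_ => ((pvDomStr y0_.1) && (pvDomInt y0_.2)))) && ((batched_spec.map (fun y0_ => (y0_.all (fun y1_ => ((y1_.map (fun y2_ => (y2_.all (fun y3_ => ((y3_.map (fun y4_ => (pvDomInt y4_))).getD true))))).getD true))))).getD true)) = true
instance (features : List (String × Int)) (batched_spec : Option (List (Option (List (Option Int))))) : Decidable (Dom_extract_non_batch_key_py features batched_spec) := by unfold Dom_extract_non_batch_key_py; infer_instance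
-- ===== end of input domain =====

-- B replaces A's "build a hash set of batched names, then test each sorted feature for
-- membership" by sorting the generated batched names and filtering the sorted features
-- with a single-pointer lockstep merge (sorted set difference); objective: alternative.

-- f"arg{i}_dim{j}" (both Pythons build this same f-string)
def pvName (i j : Int) : String := "arg" ++ PySem.Int.toStr i ++ "_dim" ++ PySem.Int.toStr j
-- f"{k}={v}" (both Pythons build this same f-string)
def pvFmt (p : String × Int) : String := p.1 ++ "=" ++ PySem.Int.toStr p.2

-- ===== PORT A =====
-- inner loop "for dim_idx, batch_flag in enumerate(arg_dims): if batch_flag is not None: add(...)"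
def pvAddDims (i : Int) (dims : List (Option Int)) (s : PySem.Set String) : PySem.Set String :=
  (PySem.List.enumerate dims).foldl
    (fun s q => match q.2 with
      | none => s
      | some _ => PySem.Set.add s (pvName i q.1)) s

def extract_non_batch_key_py (features : List (String × Int)) (batched_spec : Option (List (Option (List (Option Int))))) : String :=
  match batched_spec with
  | none =>
      PySem.Str.join "|" ((PySem.List.sorted2 features (fun p => p.1) (fun p => p.2)).map pvFmt)
  | some spec =>
      let batch_feature_names : PySem.Set String :=
        (PySem.List.enumerate spec).foldl
          (fun s p => match p.2 with
            | none => s            -- continue (non-tensor arg)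
            | some arg_dims => pvAddDims p.1 arg_dims s) PySem.Set.empty
      let non_batch_parts : List String :=
        (PySem.List.sorted2 features (fun p => p.1) (fun p => p.2)).foldl
          (fun acc p => if !PySem.Set.contains batch_feature_names p.1 then acc ++ [pvFmt p] else acc) []
      PySem.Str.join "|" non_batch_parts

-- ===== PORT B =====
-- "while t < len(names) and names[t] < k: t += 1"
def pvSkip (names : List String) (k : String) (t : Nat) : Nat :=
  if h : t < names.length then
    if names[t] < k then pvSkip names k (t + 1) else t
  else t
termination_by names.length - t
decreasing_by omega

-- one iteration of "for k, v in sorted(features.items())": advance t, then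
-- "if t == len(names) or names[t] != k: out.append(f'{k}={v}')"
def pvStep (names : List String) (st : Nat × List String) (p : String × Int) : Nat × List String :=
  let t := pvSkip names p.1 st.1
  if h : t < names.length then
    if names[t] = p.1 then (t, st.2) else (t, st.2 ++ [pvFmt p])
  else (t, st.2 ++ [pvFmt p])

def extract_non_batch_key_py_alt (features : List (String × Int)) (batched_spec : Option (List (Option (List (Option Int))))) : String :=
  -- names = sorted(f"arg{i}_dim{j}" for i, dims in enumerate(batched_spec or [])
  --               for j, flag in enumerate(dims or []) if flag is not None)
  let names : List String :=
    PySem.List.sorted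
      ((PySem.List.enumerate (batched_spec.getD [])).flatMap (fun p =>
        (PySem.List.enumerate (p.2.getD [])).filterMap (fun q =>
          q.2.map (fun _ => pvName p.1 q.1)))) (fun x => x)
  -- out = []; t = 0; for k, v in sorted(features.items()): …
  PySem.Str.join "|"
    (((PySem.List.sorted2 features (fun p => p.1) (fun p => p.2)).foldl (pvStep names) (0, [])).2)

-- ===== PRECONDITION & SPEC =====
def Spec_extract_non_batch_key_py (features : List (String × Int)) (batched_spec : Option (List (Option (List (Option Int))))) (out : String) : Prop := out = extract_non_batch_key_py_alt features batched_spec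
instance (features : List (String × Int)) (batched_spec : Option (List (Option (List (Option Int))))) (out : String) : Decidable (Spec_extract_non_batch_key_py features batched_spec out) := by unfold Spec_extract_non_batch_key_py; infer_instance

-- ===== CLAIM (what is proved, stated in full; the proofs are below) =====
def Claim_equal_extract_non_batch_key_py : Prop := ∀ (features : List (String × Int)) (batched_spec : Option (List (Option (List (Option Int))))), Dom_extract_non_batch_key_py features batched_spec → Spec_extract_non_batch_key_py features batched_spec (extract_non_batch_key_py features batched_spec)

-- ===== LEMMAS AND PROOFS =====

-- the batched feature names, as one flat list (proof device shared by both sides)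
def pvDimNames (i : Int) (dims : List (Option Int)) : List String :=
  (PySem.List.enumerate dims).filterMap (fun q => q.2.map (fun _ => pvName i q.1))

def pvAllNames (spec : List (Option (List (Option Int)))) : List String :=
  (PySem.List.enumerate spec).flatMap (fun p => pvDimNames p.1 (p.2.getD []))

theorem aux_set (i : Int) (l : List (Int × Option Int)) (s : PySem.Set String) (x : String) :
    x ∈ l.foldl (fun s q => match q.2 with
      | none => s
      | some _ => PySem.Set.add s (pvName i q.1)) s
    ↔ x ∈ s ∨ x ∈ l.filterMap (fun q => q.2.map (fun _ => pvName i q.1)) := by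
  induction l generalizing s with
  | nil => simp
  | cons q rest ih =>
    obtain ⟨a, b⟩ := q
    cases b with
    | none => simp [ih]
    | some w => simp [ih, PySem.Set.mem_add]; tauto

theorem mem_pvAddDims (i : Int) (dims : List (Option Int)) (s : PySem.Set String) (x : String) :
    x ∈ pvAddDims i dims s ↔ x ∈ s ∨ x ∈ pvDimNames i dims :=
  aux_set i (PySem.List.enumerate dims) s x

theorem aux_set_outer (l : List (Int × Option (List (Option Int)))) (s : PySem.Set String) (x : String) :
    x ∈ l.foldl (fun s p => match p.2 with
      | none => s
      | some arg_dims => pvAddDims p.1 arg_dims s) s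
    ↔ x ∈ s ∨ x ∈ l.flatMap (fun p => pvDimNames p.1 (p.2.getD [])) := by
  induction l generalizing s with
  | nil => simp
  | cons q rest ih =>
    obtain ⟨a, b⟩ := q
    cases b with
    | none =>
      simp only [List.foldl_cons, List.flatMap_cons]
      rw [ih]
      have hnil : pvDimNames a ([] : List (Option Int)) = [] := rfl
      simp [hnil]
    | some dims =>
      simp only [List.foldl_cons, List.flatMap_cons]
      rw [ih, mem_pvAddDims]
      simp only [List.mem_append, Option.getD_some]
      tauto

-- insertion sort (PySem.List.insertBy fold) keeps the list ordered for any
-- asymmetric, transitive 'before' predicate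
theorem insertBy_pairwise {α : Type} (bef : α → α → Bool)
    (hasym : ∀ a b, bef a b = true → bef b a = false)
    (htrans : ∀ a b c, bef a b = true → bef b c = true → bef a c = true)
    (x : α) : ∀ (acc : List α), acc.Pairwise (fun a b => bef b a = false) →
    (PySem.List.insertBy bef x acc).Pairwise (fun a b => bef b a = false) := by
  intro acc h
  induction acc with
  | nil => simp [PySem.List.insertBy]
  | cons y ys ih =>
    rw [List.pairwise_cons] at h
    obtain ⟨hy, hys⟩ := h
    by_cases hb : bef x y = true
    · have he : PySem.List.insertBy bef x (y :: ys) = x :: y :: ys := by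
        simp [PySem.List.insertBy, hb]
      rw [he, List.pairwise_cons]
      refine ⟨?_, by rw [List.pairwise_cons]; exact ⟨hy, hys⟩⟩
      intro z hz
      rcases List.mem_cons.mp hz with rfl | hz'
      · exact hasym x z hb
      · by_contra hzx
        have hzx' : bef z x = true := by
          cases h' : bef z x
          · exact absurd h' hzx
          · rfl
        have := htrans z x y hzx' hb
        rw [hy z hz'] at this
        exact Bool.false_ne_true this
    · have hb' : bef x y = false := by
        cases h' : bef x y
        · rfl
        · exact absurd h' hb
      have he : PySem.List.insertBy bef x (y :: ys) = y :: PySem.List.insertBy bef x ys := by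
        simp [PySem.List.insertBy, hb']
      rw [he, List.pairwise_cons]
      refine ⟨?_, ih hys⟩
      intro z hz
      rcases (PySem.List.mem_insertBy bef x z ys).mp hz with rfl | hz'
      · exact hb'
      · exact hy z hz'

theorem foldl_insertBy_pairwise {α : Type} (bef : α → α → Bool)
    (hasym : ∀ a b, bef a b = true → bef b a = false)
    (htrans : ∀ a b c, bef a b = true → bef b c = true → bef a c = true) :
    ∀ (xs acc : List α), acc.Pairwise (fun a b => bef b a = false) →
    (xs.foldl (fun acc x => PySem.List.insertBy bef x acc) acc).Pairwise (fun a b => bef b a = false) := by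
  intro xs
  induction xs with
  | nil => intro acc h; simpa using h
  | cons x xs' ih =>
    intro acc h
    exact ih _ (insertBy_pairwise bef hasym htrans x acc h)

-- sorted(features.items()) has non-decreasing keys
theorem sorted2_keys_pairwise (features : List (String × Int)) :
    (PySem.List.sorted2 features (fun p => p.1) (fun p => p.2)).Pairwise
      (fun a b : String × Int => a.1 ≤ b.1) := by
  have h := foldl_insertBy_pairwise
    (bef := fun a b : String × Int =>
      decide (a.1 < b.1) || (!decide (b.1 < a.1) && decide (a.2 < b.2)))
    (hasym := by
      intro a b hab
      simp only [Bool.or_eq_true, Bool.and_eq_true, Bool.not_eq_true', decide_eq_true_eq,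
        decide_eq_false_iff_not] at hab
      simp only [Bool.or_eq_false_iff, Bool.and_eq_false_iff, decide_eq_false_iff_not]
      rcases hab with h1 | ⟨h2, h3⟩
      · exact ⟨lt_asymm h1, Or.inl (by simp [h1])⟩
      · exact ⟨h2, Or.inr (lt_asymm h3)⟩)
    (htrans := by
      intro a b c hab hbc
      simp only [Bool.or_eq_true, Bool.and_eq_true, Bool.not_eq_true', decide_eq_true_eq,
        decide_eq_false_iff_not] at *
      rcases hab with h1 | ⟨h2, h3⟩ <;> rcases hbc with g1 | ⟨g2, g3⟩
      · exact Or.inl (lt_trans h1 g1)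
      · exact Or.inl (lt_of_lt_of_le h1 (not_lt.mp g2))
      · exact Or.inl (lt_of_le_of_lt (not_lt.mp h2) g1)
      · exact Or.inr ⟨fun hc => h2 (lt_of_le_of_lt (not_lt.mp g2) hc), lt_trans h3 g3⟩)
    features []
    (by simp)
  have heq : PySem.List.sorted2 features (fun p => p.1) (fun p => p.2)
      = features.foldl (fun acc x => PySem.List.insertBy
          (fun a b : String × Int =>
            decide (a.1 < b.1) || (!decide (b.1 < a.1) && decide (a.2 < b.2))) x acc) [] := rfl
  rw [heq]
  refine List.Pairwise.imp ?_ h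
  intro a b hba
  simp only [Bool.or_eq_false_iff, Bool.and_eq_false_iff, decide_eq_false_iff_not] at hba
  exact not_lt.mp hba.1

-- the while loop: where pvSkip stops
theorem pvSkip_spec (names : List String) (k : String) (t : Nat) :
    t ≤ pvSkip names k t ∧
    (t ≤ names.length → pvSkip names k t ≤ names.length) ∧
    (∀ u (hu : u < names.length), t ≤ u → u < pvSkip names k t → names[u] < k) ∧
    (∀ h : pvSkip names k t < names.length, ¬ names[pvSkip names k t] < k) := by
  fun_induction pvSkip names k t with
  | case1 t h hlt ih =>
    obtain ⟨ih1, ih2, ih3, ih4⟩ := ih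
    refine ⟨by omega, fun _ => ih2 (by omega), ?_, ih4⟩
    intro u hu htu hult
    rcases Nat.eq_or_lt_of_le htu with rfl | h'
    · simpa using hlt
    · exact ih3 u hu h' hult
  | case2 t h hnlt =>
    exact ⟨le_refl t, fun _ => le_of_lt h, fun u hu h1 h2 => absurd (lt_of_le_of_lt h1 h2) (lt_irrefl t), fun _ => hnlt⟩
  | case3 t h =>
    exact ⟨le_refl t, fun h' => h', fun u hu h1 h2 => absurd (lt_of_le_of_lt h1 h2) (lt_irrefl t), fun hlt => absurd hlt h⟩

-- the merge filters the sorted features by membership in the sorted name list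
theorem merge_spec (N : List String) (hN : N.Pairwise (fun a b => a ≤ b)) :
    ∀ (fs : List (String × Int)), fs.Pairwise (fun a b => a.1 ≤ b.1) →
    ∀ (t : Nat) (acc : List String), t ≤ N.length →
    (∀ u (hu : u < N.length), u < t → ∀ p ∈ fs, N[u] < p.1) →
    (fs.foldl (pvStep N) (t, acc)).2
      = acc ++ (fs.filter (fun p => !decide (p.1 ∈ N))).map pvFmt := by
  intro fs
  induction fs with
  | nil => intro _ t acc _ _; simp
  | cons p fs' ih =>
    intro hpw t acc ht hinv
    rw [List.pairwise_cons] at hpw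
    obtain ⟨hhead, htail⟩ := hpw
    obtain ⟨s1, s2, s3, s4⟩ := pvSkip_spec N p.1 t
    have ht'len : pvSkip N p.1 t ≤ N.length := s2 ht
    have hlt : ∀ u (hu : u < N.length), u < pvSkip N p.1 t → N[u] < p.1 := by
      intro u hu hu'
      by_cases h : u < t
      · exact hinv u hu h p (List.mem_cons_self)
      · exact s3 u hu (by omega) hu'
    have hmem : p.1 ∈ N ↔ ∃ h : pvSkip N p.1 t < N.length, N[pvSkip N p.1 t] = p.1 := by
      constructor
      · intro hm
        obtain ⟨u, hu, hup⟩ := List.mem_iff_getElem.mp hm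
        have hut : pvSkip N p.1 t ≤ u := by
          by_contra hc
          exact absurd (hup ▸ hlt u hu (by omega)) (lt_irrefl p.1)
        have ht'lt : pvSkip N p.1 t < N.length := lt_of_le_of_lt hut hu
        refine ⟨ht'lt, ?_⟩
        rcases Nat.eq_or_lt_of_le hut with he | hlt'
        · subst he; exact hup
        · have hle : N[pvSkip N p.1 t] ≤ N[u] :=
            List.pairwise_iff_getElem.mp hN _ u ht'lt hu hlt'
          exact le_antisymm (le_of_le_of_eq hle hup) (not_lt.mp (s4 ht'lt))
      · rintro ⟨h, he⟩
        rw [← he]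
        exact List.getElem_mem h
    have hstep : pvStep N (t, acc) p
        = (pvSkip N p.1 t, if p.1 ∈ N then acc else acc ++ [pvFmt p]) := by
      by_cases h1 : pvSkip N p.1 t < N.length
      · by_cases h2 : N[pvSkip N p.1 t] = p.1
        · have hm : p.1 ∈ N := hmem.mpr ⟨h1, h2⟩
          simp [pvStep, h1, h2, hm]
        · have hm : p.1 ∉ N := by
            intro hm
            obtain ⟨_, he⟩ := hmem.mp hm
            exact h2 he
          simp [pvStep, h1, h2, hm]
      · have hm : p.1 ∉ N := by
          intro hm
          obtain ⟨h', _⟩ := hmem.mp hm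
          exact h1 h'
        simp [pvStep, h1, hm]
    have hinv' : ∀ u (hu : u < N.length), u < pvSkip N p.1 t → ∀ q ∈ fs', N[u] < q.1 := by
      intro u hu hu' q hq
      exact lt_of_lt_of_le (hlt u hu hu') (hhead q hq)
    simp only [List.foldl_cons, hstep]
    by_cases hm : p.1 ∈ N
    · rw [if_pos hm, ih htail _ acc ht'len hinv']
      simp [hm]
    · rw [if_neg hm, ih htail _ (acc ++ [pvFmt p]) ht'len hinv']
      simp [hm]

-- main equivalence
theorem pv_main (features : List (String × Int)) (batched_spec : Option (List (Option (List (Option Int))))) :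
    extract_non_batch_key_py features batched_spec = extract_non_batch_key_py_alt features batched_spec := by
  have hS := sorted2_keys_pairwise features
  have hB : ∀ spec' : List (Option (List (Option Int))),
      extract_non_batch_key_py_alt features (some spec')
        = PySem.Str.join "|"
            (((PySem.List.sorted2 features (fun p => p.1) (fun p => p.2)).filter
              (fun p => !decide (p.1 ∈ pvAllNames spec'))).map pvFmt) := by
    intro spec'
    show PySem.Str.join "|"
        (((PySem.List.sorted2 features (fun p => p.1) (fun p => p.2)).foldl
          (pvStep (PySem.List.sorted (pvAllNames spec') (fun x => x))) (0, [])).2) = _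
    have hNp : (PySem.List.sorted (pvAllNames spec') (fun x => x)).Pairwise (fun a b : String => a ≤ b) := by
      simpa using PySem.List.sorted_pairwise (pvAllNames spec') (fun x => x)
    rw [merge_spec _ hNp _ hS 0 [] (Nat.zero_le _) (fun u hu h => absurd h (Nat.not_lt_zero u))]
    simp only [List.nil_append]
    congr 1
    congr 1
    apply List.filter_congr
    intro p _
    congr 1
    simp [PySem.List.mem_sorted]
  cases batched_spec with
  | none =>
    rw [show (none : Option (List (Option (List (Option Int))))) = none from rfl]
    have h0 := hB []
    have : extract_non_batch_key_py_alt features none = extract_non_batch_key_py_alt features (some []) := rfl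
    rw [this, h0]
    show PySem.Str.join "|" ((PySem.List.sorted2 features (fun p => p.1) (fun p => p.2)).map pvFmt) = _
    congr 1
    have : pvAllNames [] = [] := rfl
    rw [this]
    simp
  | some spec =>
    rw [hB spec]
    show PySem.Str.join "|"
        ((PySem.List.sorted2 features (fun p => p.1) (fun p => p.2)).foldl
          (fun acc p => if !PySem.Set.contains
            ((PySem.List.enumerate spec).foldl
              (fun s p => match p.2 with
                | none => s
                | some arg_dims => pvAddDims p.1 arg_dims s) PySem.Set.empty) p.1 then acc ++ [pvFmt p] else acc) []) = _
    have hc : ∀ y, PySem.Set.contains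
        ((PySem.List.enumerate spec).foldl
          (fun s p => match p.2 with
            | none => s
            | some arg_dims => pvAddDims p.1 arg_dims s) PySem.Set.empty) y
        = decide (y ∈ pvAllNames spec) := by
      intro y
      have hm := aux_set_outer (PySem.List.enumerate spec) PySem.Set.empty y
      simp only [PySem.Set.empty, List.not_mem_nil, false_or] at hm
      simp [PySem.Set.contains, hm, pvAllNames]
    have hA : (PySem.List.sorted2 features (fun p => p.1) (fun p => p.2)).foldl
        (fun acc p => if !PySem.Set.contains
          ((PySem.List.enumerate spec).foldl
            (fun s p => match p.2 with
              | none => s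
              | some arg_dims => pvAddDims p.1 arg_dims s) PySem.Set.empty) p.1 then acc ++ [pvFmt p] else acc) []
        = List.map pvFmt (List.filter (fun p => !decide (p.1 ∈ pvAllNames spec))
            (PySem.List.sorted2 features (fun p => p.1) (fun p => p.2))) := by
      rw [show (fun (acc : List String) (p : String × Int) => if !PySem.Set.contains
        ((PySem.List.enumerate spec).foldl
          (fun s p => match p.2 with
            | none => s
            | some arg_dims => pvAddDims p.1 arg_dims s) PySem.Set.empty) p.1 then acc ++ [pvFmt p] else acc)
        = (fun acc p => if !decide (p.1 ∈ pvAllNames spec) then acc ++ [pvFmt p] else acc) from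
        funext fun acc => funext fun p => by rw [hc]]
      rw [PySem.List.foldl_append_if (fun p => !decide (p.1 ∈ pvAllNames spec)) pvFmt _ []]
      rfl
    rw [hA]

-- ===== VERDICT (by name: the statement is the Claim_ definition above) =====
theorem extract_non_batch_key_py_spec : Claim_equal_extract_non_batch_key_py := by
  intro features batched_spec _
  unfold Spec_extract_non_batch_key_py
  exact pv_main features batched_spec
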